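-- pv_equiv track=rewrite | github.com/dionsulis8460-cell/Cortex_Bet | src/domain/strategies/scientific_scorer.py | _infer_family_from_bet
-- ===== SOURCE A (Python) =====
-- def _infer_family_from_bet(bet_label: str) -> str:
--     """Infere a família de mercado a partir do label da aposta."""
--     lower = bet_label.lower()
--
--     if any(x in lower for x in ['1t', '1h', 'ht ']):
--         if any(x in lower for x in ['home', 'casa']):
--             return 'ht_home'
--         if any(x in lower for x in ['away', 'vis', 'fora']):
--             return 'ht_away'
--         return 'ht_total'
--
--     if any(x in lower for x in ['2t', '2h', 'st ']):
--         if any(x in lower for x in ['home', 'casa']):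
--             return 'ht2_home'
--         if any(x in lower for x in ['away', 'vis', 'fora']):
--             return 'ht2_away'
--         return 'ht2_total'
--
--     if any(x in lower for x in ['home', 'casa']):
--         return 'ft_home'
--     if any(x in lower for x in ['away', 'vis', 'fora']):
--         return 'ft_away'
--
--     return 'ft_total'
-- ===== SOURCE B (Python) =====
-- _PATTERNS = [
--     ('1t', 'P1'), ('1h', 'P1'), ('ht ', 'P1'),
--     ('2t', 'P2'), ('2h', 'P2'), ('st ', 'P2'),
--     ('home', 'HOME'), ('casa', 'HOME'),
--     ('away', 'AWAY'), ('vis', 'AWAY'), ('fora', 'AWAY'),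
-- ]
--
--
-- def _infer_family_from_bet(bet_label: str) -> str:
--     """Infere a família de mercado a partir do label da aposta."""
--     lower = bet_label.lower()
--     # Single left-to-right scan: at each position collect the tags of all
--     # patterns starting there; substring presence is position-independent,
--     # so the tag set determines the same family A's nested checks do.
--     tags = set()
--     for i in range(len(lower)):
--         for pat, tag in _PATTERNS:
--             if lower.startswith(pat, i):
--                 tags.add(tag)
--     period = 'ht' if 'P1' in tags else 'ht2' if 'P2' in tags else 'ft'
--     side = 'home' if 'HOME' in tags else 'away' if 'AWAY' in tags else 'total'
--     return period + '_' + side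
-- ===== Notes on version B (the rewrite author's own statement) =====
-- stated objective: alternative
-- what changed: B replaces A's branch tree of up to eight independent substring searches by a single left-to-right scan of the lowercased label against a flat pattern table, accumulating a set of matched tags (period/side), which it then decodes into the family string.
import Mathlib
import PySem

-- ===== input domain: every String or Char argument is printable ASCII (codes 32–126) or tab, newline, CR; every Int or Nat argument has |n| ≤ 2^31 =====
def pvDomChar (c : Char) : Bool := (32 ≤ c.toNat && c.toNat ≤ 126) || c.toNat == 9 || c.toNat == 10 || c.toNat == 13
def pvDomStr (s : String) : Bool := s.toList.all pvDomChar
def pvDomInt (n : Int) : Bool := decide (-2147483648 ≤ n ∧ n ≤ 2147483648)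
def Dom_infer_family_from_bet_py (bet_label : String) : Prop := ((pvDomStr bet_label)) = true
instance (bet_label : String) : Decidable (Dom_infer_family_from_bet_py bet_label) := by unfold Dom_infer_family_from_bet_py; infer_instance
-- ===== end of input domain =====

-- B replaces A's nested substring branches by a single left-to-right scan that collects a set of matched pattern tags, then decodes the tag set; objective: alternative.


-- ===== PORT A =====
def infer_family_from_bet_py (bet_label : String) : String :=
  let lower := PySem.Str.lower bet_label
  if ["1t", "1h", "ht "].any (fun x => PySem.Str.isIn x lower) then
    if ["home", "casa"].any (fun x => PySem.Str.isIn x lower) then "ht_home"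
    else if ["away", "vis", "fora"].any (fun x => PySem.Str.isIn x lower) then "ht_away"
    else "ht_total"
  else if ["2t", "2h", "st "].any (fun x => PySem.Str.isIn x lower) then
    if ["home", "casa"].any (fun x => PySem.Str.isIn x lower) then "ht2_home"
    else if ["away", "vis", "fora"].any (fun x => PySem.Str.isIn x lower) then "ht2_away"
    else "ht2_total"
  else if ["home", "casa"].any (fun x => PySem.Str.isIn x lower) then "ft_home"
  else if ["away", "vis", "fora"].any (fun x => PySem.Str.isIn x lower) then "ft_away"
  else "ft_total"

-- ===== PORT B =====
-- Source B's module constant _PATTERNS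
def pvPatterns : List (String × String) :=
  [("1t", "P1"), ("1h", "P1"), ("ht ", "P1"),
   ("2t", "P2"), ("2h", "P2"), ("st ", "P2"),
   ("home", "HOME"), ("casa", "HOME"),
   ("away", "AWAY"), ("vis", "AWAY"), ("fora", "AWAY")]

-- Source B's scan loop: for i in range(len(lower)): for pat, tag in _PATTERNS: if lower.startswith(pat, i): tags.add(tag)
-- 'lower.startswith(pat, i)' is ported by hand as pat.toList.isPrefixOf (lower.toList.drop i.toNat):
-- exact here because every i drawn from range(len(lower)) is nonnegative.
def pvCollectTags (lower : String) : PySem.Set String :=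
  (PySem.List.pyRange 0 (PySem.Str.len lower) 1).foldl
    (fun tags i =>
      pvPatterns.foldl
        (fun tags pt =>
          if pt.1.toList.isPrefixOf (lower.toList.drop i.toNat) then PySem.Set.add tags pt.2
          else tags)
        tags)
    PySem.Set.empty

def infer_family_from_bet_py_alt (bet_label : String) : String :=
  let lower := PySem.Str.lower bet_label
  let tags := pvCollectTags lower
  let period :=
    if PySem.Set.contains tags "P1" then "ht"
    else if PySem.Set.contains tags "P2" then "ht2"
    else "ft"
  let side :=
    if PySem.Set.contains tags "HOME" then "home"
    else if PySem.Set.contains tags "AWAY" then "away"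
    else "total"
  period ++ "_" ++ side

-- ===== PRECONDITION & SPEC =====
def Spec_infer_family_from_bet_py (bet_label : String) (out : String) : Prop := out = infer_family_from_bet_py_alt bet_label
instance (bet_label : String) (out : String) : Decidable (Spec_infer_family_from_bet_py bet_label out) := by unfold Spec_infer_family_from_bet_py; infer_instance

-- ===== CLAIM (what is proved, stated in full; the proofs are below) =====
def Claim_equal_infer_family_from_bet_py : Prop := ∀ (bet_label : String), Dom_infer_family_from_bet_py bet_label → Spec_infer_family_from_bet_py bet_label (infer_family_from_bet_py bet_label)

-- ===== LEMMAS AND PROOFS =====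

-- membership in the inner fold (over the pattern table) that conditionally adds tags
theorem pv_mem_foldl_addIf {α β : Type} [BEq α] [LawfulBEq α] (P : β → Bool) (g : β → α)
    (l : List β) (s : PySem.Set α) (x : α) :
    x ∈ l.foldl (fun s p => if P p then PySem.Set.add s (g p) else s) s ↔
      x ∈ s ∨ ∃ p ∈ l, P p = true ∧ g p = x := by
  induction l generalizing s with
  | nil => simp
  | cons p rest ih =>
    simp only [List.foldl_cons]
    by_cases h : P p
    · rw [if_pos h, ih]
      simp [PySem.Set.mem_add, h]
      tauto
    · rw [if_neg h, ih]
      simp [h]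

-- membership in the outer fold (over the scan positions)
theorem pv_mem_foldl_scan {α β γ : Type} [BEq α] [LawfulBEq α] (C : γ → β → Bool) (g : β → α)
    (pats : List β) (l : List γ) (s : PySem.Set α) (x : α) :
    x ∈ l.foldl (fun s i => pats.foldl (fun s p => if C i p then PySem.Set.add s (g p) else s) s) s ↔
      x ∈ s ∨ ∃ i ∈ l, ∃ p ∈ pats, C i p = true ∧ g p = x := by
  induction l generalizing s with
  | nil => simp
  | cons i rest ih =>
    simp only [List.foldl_cons]
    rw [ih]
    rw [pv_mem_foldl_addIf]
    constructor
    · rintro (h | h)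
      · rcases h with h | ⟨p, hp, hc, hg⟩
        · exact Or.inl h
        · exact Or.inr ⟨i, by simp, p, hp, hc, hg⟩
      · rcases h with ⟨j, hj, p, hp, hc, hg⟩
        exact Or.inr ⟨j, by simp [hj], p, hp, hc, hg⟩
    · rintro (h | ⟨j, hj, p, hp, hc, hg⟩)
      · exact Or.inl (Or.inl h)
      · rcases List.mem_cons.1 hj with rfl | hj
        · exact Or.inl (Or.inr ⟨p, hp, hc, hg⟩)
        · exact Or.inr ⟨j, hj, p, hp, hc, hg⟩

theorem pv_mem_collect (lower : String) (t : String) :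
    t ∈ pvCollectTags lower ↔
      ∃ i ∈ PySem.List.pyRange 0 (PySem.Str.len lower) 1, ∃ p ∈ pvPatterns,
        p.1.toList.isPrefixOf (lower.toList.drop i.toNat) = true ∧ p.2 = t := by
  unfold pvCollectTags
  rw [pv_mem_foldl_scan (fun (i : Int) (pt : String × String) =>
        pt.1.toList.isPrefixOf (lower.toList.drop i.toNat)) (fun pt => pt.2)]
  simp [PySem.Set.empty]

-- a nonempty pattern occurs at some scanned position iff it is a substring
theorem pv_exists_pos_iff_isIn (sub : List Char) (lower : String) (h : sub ≠ []) :
    (∃ i ∈ PySem.List.pyRange 0 (PySem.Str.len lower) 1,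
        sub.isPrefixOf (lower.toList.drop i.toNat) = true) ↔
      PySem.Chars.isIn sub lower.toList = true := by
  rw [← PySem.Chars.exists_prefix_drop_iff_isIn]
  constructor
  · rintro ⟨i, _, hp⟩
    exact ⟨i.toNat, List.isPrefixOf_iff_prefix.1 hp⟩
  · rintro ⟨j, hj⟩
    by_cases hlt : j < lower.toList.length
    · refine ⟨(j : Int), ?_, ?_⟩
      · rw [PySem.List.mem_pyRange_one, PySem.Str.len_eq]
        constructor <;> [positivity; exact_mod_cast hlt]
      · simpa [List.isPrefixOf_iff_prefix] using hj
    · exfalso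
      rw [List.drop_eq_nil_of_le (by omega)] at hj
      exact h (List.prefix_nil.1 hj)

-- per-tag characterisations: each tag is in the collected set iff A's corresponding any-check fires
theorem pv_tag_iff (lower : String) (t : String) (subs : List String)
    (hsubs : ∀ p ∈ pvPatterns, (p.2 = t ↔ p.1 ∈ subs)) (hnil : ∀ x ∈ subs, x.toList ≠ [])
    (hin : ∀ x ∈ subs, (x, t) ∈ pvPatterns) :
    PySem.Set.contains (pvCollectTags lower) t =
      subs.any (fun x => PySem.Str.isIn x lower) := by
  rw [Bool.eq_iff_iff]
  rw [show (PySem.Set.contains (pvCollectTags lower) t = true) ↔ t ∈ pvCollectTags lower by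
        simp [PySem.Set.contains]]
  rw [pv_mem_collect, List.any_eq_true]
  constructor
  · rintro ⟨i, hi, p, hp, hpre, hpt⟩
    refine ⟨p.1, (hsubs p hp).1 hpt, ?_⟩
    rw [PySem.Str.isIn_eq, ← pv_exists_pos_iff_isIn p.1.toList lower
          (fun hc => hnil p.1 ((hsubs p hp).1 hpt) hc)]
    exact ⟨i, hi, hpre⟩
  · rintro ⟨x, hx, hisin⟩
    rw [PySem.Str.isIn_eq, ← pv_exists_pos_iff_isIn x.toList lower (hnil x hx)] at hisin
    rcases hisin with ⟨i, hi, hpre⟩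
    exact ⟨i, hi, (x, t), hin x hx, hpre, rfl⟩

theorem pv_tag_P1 (lower : String) :
    PySem.Set.contains (pvCollectTags lower) "P1" =
      (["1t", "1h", "ht "].any (fun x => PySem.Str.isIn x lower)) :=
  pv_tag_iff lower "P1" ["1t", "1h", "ht "] (by decide) (by decide) (by decide)

theorem pv_tag_P2 (lower : String) :
    PySem.Set.contains (pvCollectTags lower) "P2" =
      (["2t", "2h", "st "].any (fun x => PySem.Str.isIn x lower)) :=
  pv_tag_iff lower "P2" ["2t", "2h", "st "] (by decide) (by decide) (by decide)

theorem pv_tag_HOME (lower : String) :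
    PySem.Set.contains (pvCollectTags lower) "HOME" =
      (["home", "casa"].any (fun x => PySem.Str.isIn x lower)) :=
  pv_tag_iff lower "HOME" ["home", "casa"] (by decide) (by decide) (by decide)

theorem pv_tag_AWAY (lower : String) :
    PySem.Set.contains (pvCollectTags lower) "AWAY" =
      (["away", "vis", "fora"].any (fun x => PySem.Str.isIn x lower)) :=
  pv_tag_iff lower "AWAY" ["away", "vis", "fora"] (by decide) (by decide) (by decide)

-- ===== VERDICT (by name: the statement is the Claim_ definition above) =====
theorem infer_family_from_bet_py_spec : Claim_equal_infer_family_from_bet_py := by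
  intro s _
  unfold Spec_infer_family_from_bet_py infer_family_from_bet_py infer_family_from_bet_py_alt
  dsimp only
  rw [pv_tag_P1, pv_tag_P2, pv_tag_HOME, pv_tag_AWAY]
  split_ifs <;> rfl
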